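-- pv_equiv track=rewrite | github.com/djf604/RiboHMM | ribohmm/utils.py | write_seq
-- ===== SOURCE A (Python) =====
-- def write_seq(seq, numbers=False):
--   out = ''
--   for i, s in enumerate(seq):
--     if i % 3 == 0:
--       out += ' '
--       if numbers:
--         out += '[{}]'.format((int(i / 3)))
--     out += s
--   return out.strip()
--   if divmod(len(seq), 3)[1] != 0:
--     offset = 1
--   else:
--     offset = 0
--   return ' '.join([seq[s:s + 3] for s in range(int(len(seq) / 3) + offset)])
-- ===== SOURCE B (Python) =====
-- def write_seq(seq, numbers=False):
--     chunks = [''.join(seq[i:i + 3]) for i in range(0, len(seq), 3)]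
--     if numbers:
--         chunks = ['[{}]{}'.format(k, c) for k, c in enumerate(chunks)]
--     return ' '.join(chunks).strip()
-- ===== Notes on version B (the rewrite author's own statement) =====
-- stated objective: simpler
-- what changed: Replaces the per-character scan with an i%3 test and incremental string accumulation by striding over the sequence in 3-slices, labelling each chunk once, joining the chunks with single spaces, and a final strip.
import Mathlib
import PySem

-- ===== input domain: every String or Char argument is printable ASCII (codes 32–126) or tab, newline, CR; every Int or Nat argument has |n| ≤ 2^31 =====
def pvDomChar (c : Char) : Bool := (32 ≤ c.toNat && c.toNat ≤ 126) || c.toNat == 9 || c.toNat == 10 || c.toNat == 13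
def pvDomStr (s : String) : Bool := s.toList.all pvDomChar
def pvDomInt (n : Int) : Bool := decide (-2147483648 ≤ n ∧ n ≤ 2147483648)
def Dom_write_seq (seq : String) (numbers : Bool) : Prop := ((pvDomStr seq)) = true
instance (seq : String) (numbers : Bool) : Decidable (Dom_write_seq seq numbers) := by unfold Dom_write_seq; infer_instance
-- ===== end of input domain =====

-- B replaces A's per-character i%3 scan with 3-strided slicing, a single space-join of the chunks and a final strip (simpler decomposition; same result proved for all strings).


-- ===== PORT A =====
-- for i, s in enumerate(seq): if i % 3 == 0: out += ' '; if numbers: out += '[{}]'.format(int(i/3)); out += s; return out.strip()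
-- (int(i/3) with i ≥ 0 is floor division; code after A's first return is unreachable and not ported)
def write_seq (seq : String) (numbers : Bool) : String :=
  let out : List Char :=
    (PySem.List.enumerate seq.toList).foldl
      (fun out p =>
        let out :=
          if PySem.Int.mod p.1 3 == 0 then
            let out := out ++ [' ']
            if numbers then out ++ ('[' :: (PySem.Int.toChars (PySem.Int.floordiv p.1 3) ++ [']'])) else out
          else out
        out ++ [p.2]) []
  String.ofList (PySem.Chars.strip out)

-- ===== PORT B =====
-- chunks = [''.join(seq[i:i+3]) for i in range(0, len(seq), 3)]  (''.join of a string slice is that slice)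
-- if numbers: chunks = ['[{}]{}'.format(k, c) for k, c in enumerate(chunks)]
-- return ' '.join(chunks).strip()
def write_seq_alt (seq : String) (numbers : Bool) : String :=
  let cs := seq.toList
  let chunks := (PySem.List.pyRange 0 (PySem.Chars.len cs) 3).map
      (fun i => PySem.List.slice cs (some i) (some (i + 3)))
  let chunks := if numbers then
      (PySem.List.enumerate chunks).map (fun p => ('[' :: (PySem.Int.toChars p.1 ++ [']'])) ++ p.2)
    else chunks
  String.ofList (PySem.Chars.strip (PySem.Chars.join [' '] chunks))

-- ===== PRECONDITION & SPEC =====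
def Spec_write_seq (seq : String) (numbers : Bool) (out : String) : Prop := out = write_seq_alt seq numbers
instance (seq : String) (numbers : Bool) (out : String) : Decidable (Spec_write_seq seq numbers out) := by unfold Spec_write_seq; infer_instance

-- ===== CLAIM (what is proved, stated in full; the proofs are below) =====
def Claim_equal_write_seq : Prop := ∀ (seq : String) (numbers : Bool), Dom_write_seq seq numbers → Spec_write_seq seq numbers (write_seq seq numbers)

-- ===== LEMMAS AND PROOFS =====

-- the chunk label: '[k]' when numbers, '' otherwise
def pvLabel (numbers : Bool) (k : Int) : List Char :=
  if numbers then '[' :: (PySem.Int.toChars k ++ [']']) else []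

-- the sequence cut into 3-chunks
def pvChunks : List Char → List (List Char)
  | [] => []
  | [a] => [[a]]
  | [a, b] => [[a, b]]
  | a :: b :: c :: rest => [a, b, c] :: pvChunks rest

-- chunks with their labels prepended, chunk indices starting at m
def pvLabeled (numbers : Bool) : Int → List (List Char) → List (List Char)
  | _, [] => []
  | m, c :: t => (pvLabel numbers m ++ c) :: pvLabeled numbers (m + 1) t

theorem pvChunks_cons (cs : List Char) (h : cs ≠ []) :
    pvChunks cs = cs.take 3 :: pvChunks (cs.drop 3) := by
  match cs with
  | [] => exact absurd rfl h
  | [a] => simp [pvChunks]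
  | [a, b] => simp [pvChunks]
  | a :: b :: c :: rest => simp [pvChunks]

theorem pvMod3 (m : Int) : PySem.Int.mod (3 * m) 3 = 0 := by
  rw [PySem.Int.mod_eq_emod_of_pos (by omega : (0:Int) < 3)]; omega

theorem pvMod3₁ (m : Int) : PySem.Int.mod (3 * m + 1) 3 = 1 := by
  rw [PySem.Int.mod_eq_emod_of_pos (by omega : (0:Int) < 3)]; omega

theorem pvMod3₂ (m : Int) : PySem.Int.mod (3 * m + 1 + 1) 3 = 2 := by
  rw [PySem.Int.mod_eq_emod_of_pos (by omega : (0:Int) < 3)]; omega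

theorem pvDiv3 (m : Int) : PySem.Int.floordiv (3 * m) 3 = m := by
  rw [PySem.Int.floordiv_eq_ediv_of_pos (by omega : (0:Int) < 3)]; omega

-- A's loop, started at index 3*m with accumulator acc, appends exactly the labeled 3-chunks, each preceded by ' '
theorem pvLoopA (numbers : Bool) (cs : List Char) (m : Int) (acc : List Char) :
    (PySem.List.enumerate cs (3 * m)).foldl
      (fun out p =>
        let out :=
          if PySem.Int.mod p.1 3 == 0 then
            let out := out ++ [' ']
            if numbers then out ++ ('[' :: (PySem.Int.toChars (PySem.Int.floordiv p.1 3) ++ [']'])) else out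
          else out
        out ++ [p.2]) acc
    = acc ++ (pvLabeled numbers m (pvChunks cs)).flatMap (fun c => ' ' :: c) := by
  induction cs using pvChunks.induct generalizing m acc with
  | case1 => simp [pvChunks, pvLabeled, PySem.List.enumerate]
  | case2 a =>
    simp [PySem.List.enumerate, pvChunks, pvLabeled, pvMod3, pvMod3₁, pvDiv3, pvLabel]
    cases numbers <;> simp
  | case3 a b =>
    simp [PySem.List.enumerate, pvChunks, pvLabeled, pvMod3, pvMod3₁, pvMod3₂, pvDiv3, pvLabel]
    cases numbers <;> simp
  | case4 a b c rest ih =>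
    have h3 : 3 * m + 1 + 1 + 1 = 3 * (m + 1) := by ring
    rw [PySem.List.enumerate_cons, PySem.List.enumerate_cons, PySem.List.enumerate_cons,
      List.foldl_cons, List.foldl_cons, List.foldl_cons, h3, ih (m + 1)]
    simp [pvMod3, pvMod3₁, pvMod3₂, pvDiv3, pvChunks, pvLabeled, pvLabel]
    cases numbers <;> simp [show ¬ ((3:Int) ∣ 3 * m + 1 + 1) from by omega]

-- the striding comprehension of B computes pvChunks
theorem pvRange3_cons (a b : Int) (h : a < b) :
    PySem.List.pyRange a b 3 = a :: PySem.List.pyRange (a + 3) b 3 := by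
  rw [PySem.List.pyRange_of_pos a b (by omega), PySem.List.pyRange_of_pos (a + 3) b (by omega)]
  have hc : (if a < b then ((b - a + 3 - 1) / 3).toNat else 0)
      = (if a + 3 < b then ((b - (a + 3) + 3 - 1) / 3).toNat else 0) + 1 := by
    split_ifs <;> omega
  rw [hc, List.range_succ_eq_map]
  simp [Function.comp_def]
  intro k _
  push_cast; ring

theorem pvChunksB (cs : List Char) (m : Nat) :
    (PySem.List.pyRange (3 * (m : Int)) cs.length 3).map
        (fun i => PySem.List.slice cs (some i) (some (i + 3)))
      = pvChunks (cs.drop (3 * m)) := by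
  by_cases h : cs.length ≤ 3 * m
  · rw [PySem.List.pyRange_of_pos _ _ (by omega : (0:Int) < 3)]
    have : ¬ (3 * (m : Int) < cs.length) := by push_cast; omega
    simp [this, List.drop_eq_nil_of_le h, pvChunks]
  · push_neg at h
    rw [pvRange3_cons _ _ (by exact_mod_cast h)]
    have h3 : (3 : Int) * m + 3 = 3 * ((m + 1 : Nat) : Int) := by push_cast; ring
    have hs : PySem.List.slice cs (some (3 * (m : Int))) (some (3 * (m : Int) + 3))
        = (cs.drop (3 * m)).take 3 := by
      have := PySem.List.slice_natCast_add cs (3 * m) 3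
      simpa using this
    have hd : (cs.drop (3 * m)).drop 3 = cs.drop (3 * (m + 1)) := by
      rw [List.drop_drop]; congr 1 <;> omega
    rw [List.map_cons, hs, h3, pvChunksB cs (m + 1),
        pvChunks_cons (cs.drop (3 * m)) (by simp; omega), hd]
termination_by cs.length - 3 * m
decreasing_by omega

-- B's enumerate-map labelling is pvLabeled
theorem pvLabeledB (numbers : Bool) (chunks : List (List Char)) (m : Int) :
    (if numbers then
        (PySem.List.enumerate chunks m).map (fun p => ('[' :: (PySem.Int.toChars p.1 ++ [']'])) ++ p.2)
      else chunks)
    = pvLabeled numbers m chunks := by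
  induction chunks generalizing m with
  | nil => cases numbers <;> simp [pvLabeled, PySem.List.enumerate]
  | cons c t ih =>
    cases numbers with
    | false =>
      have h := ih (m + 1)
      simp only [Bool.false_eq_true, if_false] at h
      simp [pvLabeled, pvLabel, ← h]
    | true =>
      have h := ih (m + 1)
      simp at h
      simp [pvLabeled, pvLabel, PySem.List.enumerate_cons, h]

-- ' '-prefixed flatten vs ' '.join: equal after strip
theorem pvFlatMap_join (ps : List (List Char)) (h : ps ≠ []) :
    ps.flatMap (fun c => ' ' :: c) = ' ' :: PySem.Chars.join [' '] ps := by
  induction ps with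
  | nil => exact absurd rfl h
  | cons p t ih =>
    cases t with
    | nil => simp [PySem.Chars.join, List.intercalate]
    | cons q t' =>
      rw [PySem.Chars.join_cons_cons]
      simp only [List.flatMap_cons, ih (by simp)]
      simp

theorem pvStrip_flatMap (ps : List (List Char)) :
    PySem.Chars.strip (ps.flatMap (fun c => ' ' :: c)) = PySem.Chars.strip (PySem.Chars.join [' '] ps) := by
  cases ps with
  | nil => simp [PySem.Chars.join_nil]
  | cons p t =>
    rw [pvFlatMap_join _ (by simp)]
    simp [PySem.Chars.strip, PySem.Chars.lstrip, List.dropWhile,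
      show PySem.Chars.isspace ' ' = true from by decide]

-- ===== VERDICT (by name: the statement is the Claim_ definition above) =====
theorem write_seq_spec : Claim_equal_write_seq := by
  intro seq numbers _
  show write_seq seq numbers = write_seq_alt seq numbers
  unfold write_seq write_seq_alt
  have hA := pvLoopA numbers seq.toList 0 []
  simp only [mul_zero] at hA
  rw [hA]
  have hB := pvChunksB seq.toList 0
  simp only [Nat.cast_zero, mul_zero, List.drop_zero] at hB
  simp only [PySem.Chars.len_eq] at *
  rw [hB, pvLabeledB]
  simp [pvStrip_flatMap]
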